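-- pv_equiv track=rewrite | github.com/gimacorp/se-toolkit-lab-6 | run_eval.py | check_tools_used
-- ===== SOURCE A (Python) =====
-- def check_tools_used(output: dict, required_tools: list) -> bool:
--     """Check if all required tools were used."""
--     if not output or "tool_calls" not in output:
--         return False
--
--     used_tools = [tc["tool"] for tc in output["tool_calls"]]
--
--     for required in required_tools:
--         if required not in used_tools:
--             return False
--
--     return True
-- ===== SOURCE B (Python) =====
-- def check_tools_used(output: dict, required_tools: list) -> bool:
--     """Check if all required tools were used."""
--     if not output or "tool_calls" not in output:
--         return False
--     pending = list(dict.fromkeys(required_tools))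
--     for tc in output["tool_calls"]:
--         if not pending:
--             break
--         pending = [t for t in pending if t != tc["tool"]]
--     return not pending
-- ===== Notes on version B (the rewrite author's own statement) =====
-- stated objective: alternative
-- what changed: Reversed the traversal: instead of materialising used_tools and scanning required_tools against it, B keeps a deduplicated list of pending requirements and makes one pass over the actual tool_calls, filtering each seen tool out and stopping early once nothing is pending; the result is whether anything remains pending.
import Mathlib
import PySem

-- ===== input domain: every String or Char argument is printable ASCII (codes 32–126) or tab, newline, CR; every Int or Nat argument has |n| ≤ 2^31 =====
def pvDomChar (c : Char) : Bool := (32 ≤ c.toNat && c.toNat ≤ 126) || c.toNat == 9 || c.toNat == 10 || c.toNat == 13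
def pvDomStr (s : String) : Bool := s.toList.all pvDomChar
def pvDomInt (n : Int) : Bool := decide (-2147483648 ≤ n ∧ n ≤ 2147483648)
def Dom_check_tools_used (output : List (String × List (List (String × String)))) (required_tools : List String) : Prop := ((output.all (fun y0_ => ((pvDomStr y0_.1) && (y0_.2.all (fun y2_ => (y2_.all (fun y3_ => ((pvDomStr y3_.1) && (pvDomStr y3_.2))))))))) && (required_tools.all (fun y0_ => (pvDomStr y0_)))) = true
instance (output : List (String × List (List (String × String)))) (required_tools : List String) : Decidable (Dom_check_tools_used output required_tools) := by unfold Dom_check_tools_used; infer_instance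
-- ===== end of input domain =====

-- B reverses the traversal: it shrinks a deduplicated pending-requirements list while walking
-- tool_calls (with early exit), instead of scanning required_tools against a used_tools list.

-- ===== PORT A =====
def check_tools_used (output : List (String × List (List (String × String)))) (required_tools : List String) : Bool :=
  if output.isEmpty || !((PySem.Dict.mk output).contains "tool_calls") then false
  else
    match (PySem.Dict.mk output).get? "tool_calls" with
    | none => false  -- unreachable: key was found above
    | some tcs =>
      -- used_tools = [tc["tool"] for tc in output["tool_calls"]]; a missing "tool" key is a
      -- KeyError, excluded by Pre_ (mapM returns none there)
      match tcs.mapM (fun tc => (PySem.Dict.mk tc).get? "tool") with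
      | none => false
      | some used_tools =>
        -- for required in required_tools: if required not in used_tools: return False / return True
        required_tools.all (fun required => used_tools.contains required)

-- ===== PORT B =====
-- the for-loop of Source B: filter tc["tool"] out of pending at each call, break when pending is empty
def ctuConsume (pending : List String) (tcs : List (List (String × String))) : List String :=
  match tcs with
  | [] => pending
  | tc :: rest =>
    if pending.isEmpty then pending   -- break
    else
      ctuConsume
        (match (PySem.Dict.mk tc).get? "tool" with
         | none => pending            -- KeyError in Python; outside Pre_, value irrelevant
         | some t => pending.filter (fun x => x ≠ t))
        rest

def check_tools_used_alt (output : List (String × List (List (String × String)))) (required_tools : List String) : Bool :=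
  -- guard: `not output or "tool_calls" not in output` ⟺ the lookup finds nothing
  match (PySem.Dict.mk output).get? "tool_calls" with
  | none => false
  | some tcs =>
    -- pending = list(dict.fromkeys(required_tools)); loop; return not pending
    (ctuConsume (PySem.Set.ofList required_tools) tcs).isEmpty

-- ===== PRECONDITION & SPEC =====
-- Pre_ excludes exactly the inputs where A raises KeyError: a "tool_calls" entry whose
-- dicts lack the "tool" key.
def Pre_check_tools_used (output : List (String × List (List (String × String)))) (required_tools : List String) : Prop :=
  (match (PySem.Dict.mk output).get? "tool_calls" with
   | none => true
   | some tcs => tcs.all (fun tc => ((PySem.Dict.mk tc).get? "tool").isSome)) = true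
instance (output : List (String × List (List (String × String)))) (required_tools : List String) : Decidable (Pre_check_tools_used output required_tools) := by unfold Pre_check_tools_used; infer_instance

def pvWitness_check_tools_used : (List (String × List (List (String × String)))) × List String :=
  ([("tool_calls", [[("tool", "search")], [("tool", "calc")]])], ["search"])

def Spec_check_tools_used (output : List (String × List (List (String × String)))) (required_tools : List String) (out : Bool) : Prop := out = check_tools_used_alt output required_tools
instance (output : List (String × List (List (String × String)))) (required_tools : List String) (out : Bool) : Decidable (Spec_check_tools_used output required_tools out) := by unfold Spec_check_tools_used; infer_instance

-- ===== CLAIM (what is proved, stated in full; the proofs are below) =====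
def Claim_equal_check_tools_used : Prop := ∀ (output : List (String × List (List (String × String)))) (required_tools : List String), Dom_check_tools_used output required_tools → Pre_check_tools_used output required_tools → Spec_check_tools_used output required_tools (check_tools_used output required_tools)

-- ===== LEMMAS AND PROOFS =====

-- membership in B's leftover pending list: survived iff never seen as some tc's "tool"
theorem mem_ctuConsume (tcs : List (List (String × String))) (p : List String) (x : String) :
    x ∈ ctuConsume p tcs ↔
      x ∈ p ∧ ∀ tc ∈ tcs, (PySem.Dict.mk tc).get? "tool" ≠ some x := by
  induction tcs generalizing p with
  | nil => simp [ctuConsume]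
  | cons tc rest ih =>
    unfold ctuConsume
    by_cases hp : p.isEmpty
    · simp_all [List.isEmpty_iff]
    · simp only [hp, if_neg, Bool.false_eq_true, not_false_iff, ih]
      rcases h1 : (PySem.Dict.mk tc).get? "tool" with _ | t
      · simp [h1]
      · simp only [List.mem_filter, List.mem_cons, decide_eq_true_eq]
        constructor
        · rintro ⟨⟨hx, hne⟩, hrest⟩
          refine ⟨hx, fun c hc => ?_⟩
          rcases hc with rfl | hc
          · rw [h1]; intro he; exact hne (Option.some.inj he).symm
          · exact hrest c hc
        · rintro ⟨hx, hall⟩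
          refine ⟨⟨hx, fun h => ?_⟩, fun c hc => hall c (.inr hc)⟩
          exact hall tc (.inl rfl) (by rw [h1, h])

-- under Pre_ the extracted used_tools list characterises the tools seen in tcs
theorem mem_of_mapM (tcs : List (List (String × String))) (used : List String)
    (h : tcs.mapM (fun tc => (PySem.Dict.mk tc).get? "tool") = some used) (x : String) :
    x ∈ used ↔ ∃ tc ∈ tcs, (PySem.Dict.mk tc).get? "tool" = some x := by
  induction tcs generalizing used with
  | nil => rw [List.mapM_nil] at h; cases h; simp
  | cons tc rest ih =>
    rw [List.mapM_cons] at h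
    rcases h1 : (PySem.Dict.mk tc).get? "tool" with _ | t <;> rw [h1] at h
    · simp at h
    · rcases h2 : rest.mapM (fun tc => (PySem.Dict.mk tc).get? "tool") with _ | us <;>
        rw [h2] at h <;> simp at h
      subst h
      simp only [List.mem_cons, ih us h2]
      constructor
      · rintro (rfl | ⟨c, hc, hx⟩)
        · exact ⟨tc, .inl rfl, h1⟩
        · exact ⟨c, .inr hc, hx⟩
      · rintro ⟨c, (rfl | hc), hx⟩
        · left; rw [h1] at hx; exact (Option.some.inj hx).symm
        · right; exact ⟨c, hc, hx⟩

-- under Pre_, the list comprehension raises no KeyError: mapM succeeds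
theorem mapM_isSome (tcs : List (List (String × String)))
    (hall : ∀ tc ∈ tcs, ((PySem.Dict.mk tc).get? "tool").isSome) :
    (tcs.mapM (fun tc => (PySem.Dict.mk tc).get? "tool")).isSome := by
  induction tcs with
  | nil => rw [List.mapM_nil]; rfl
  | cons tc rest ih =>
    rw [List.mapM_cons]
    rcases h1 : (PySem.Dict.mk tc).get? "tool" with _ | t
    · exact absurd (hall tc (by simp)) (by simp [h1])
    · have := ih (fun x hx => hall x (List.mem_cons_of_mem _ hx))
      rcases h2 : rest.mapM (fun tc => (PySem.Dict.mk tc).get? "tool") with _ | us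
      · rw [h2] at this; exact absurd this (by simp)
      · simp

-- A's scan over required equals emptiness of B's leftover pending list
theorem all_contains_eq_isEmpty (required used : List String)
    (tcs : List (List (String × String)))
    (h : tcs.mapM (fun tc => (PySem.Dict.mk tc).get? "tool") = some used) :
    required.all (fun r => used.contains r)
      = (ctuConsume (PySem.Set.ofList required) tcs).isEmpty := by
  rw [Bool.eq_iff_iff, List.isEmpty_iff, List.eq_nil_iff_forall_not_mem]
  simp only [List.all_eq_true, List.contains_iff_mem, mem_ctuConsume,
    PySem.Set.mem_ofList, not_and, not_forall]
  constructor
  · rintro hall x hx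
    have := hall x hx
    rw [mem_of_mapM tcs used h] at this
    obtain ⟨c, hc, hcx⟩ := this
    exact ⟨c, hc, by simp [hcx]⟩
  · rintro hall r hr
    obtain ⟨c, hc, hcx⟩ := hall r hr
    rw [mem_of_mapM tcs used h]
    rcases h1 : (PySem.Dict.mk c).get? "tool" with _ | t
    · exact absurd h1 (by simp at hcx ⊢; simp [hcx])
    · have : t = r := by by_contra hne; exact hcx (by rw [h1]; intro he; injection he; simp_all)
      exact ⟨c, hc, by rw [h1, this]⟩

-- A's guard fires exactly when the "tool_calls" lookup fails
theorem guard_iff (output : List (String × List (List (String × String)))) :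
    (output.isEmpty || !((PySem.Dict.mk output).contains "tool_calls")) = true ↔
      (PySem.Dict.mk output).get? "tool_calls" = none := by
  rw [PySem.Dict.contains_eq_isSome_get?]
  rcases h : (PySem.Dict.mk output).get? "tool_calls" with _ | tcs
  · simp
  · simp only [Option.isSome_some, Bool.not_true, Bool.or_false, reduceCtorEq, iff_false]
    intro he
    rcases output with _ | ⟨kv, rest⟩
    · simp [PySem.Dict.get?] at h
    · simp at he

-- ===== VERDICT (by name: the statement is the Claim_ definition above) =====
theorem check_tools_used_spec : Claim_equal_check_tools_used := by
  intro output required_tools _ hpre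
  unfold Spec_check_tools_used check_tools_used check_tools_used_alt
  split
  · rename_i hg
    rw [guard_iff] at hg
    rw [hg]
  rename_i hg
  rcases hk : (PySem.Dict.mk output).get? "tool_calls" with _ | tcs
  · exact absurd ((guard_iff output).mpr hk) (by simpa using hg)
  unfold Pre_check_tools_used at hpre
  rw [hk] at hpre
  have hall : ∀ tc ∈ tcs, ((PySem.Dict.mk tc).get? "tool").isSome := by
    intro tc htc
    simpa using List.all_eq_true.mp hpre tc htc
  rcases hm : tcs.mapM (fun tc => (PySem.Dict.mk tc).get? "tool") with _ | used
  · exact absurd (mapM_isSome tcs hall) (by simp [hm])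
  · simp only [hm]
    exact all_contains_eq_isEmpty required_tools used tcs hm
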